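-- pv_equiv track=rewrite | github.com/DoingOutstanding/3dmapper | tools/list_area_exits.py | collect_area_connections
-- ===== SOURCE A (Python) =====
-- from collections import defaultdict, deque
--
-- def collect_area_connections(exits, room_index, allowed_areas: set[str]):
--     connections: dict[str, set[str]] = defaultdict(set)
--     adjacency: dict[str, set[str]] = defaultdict(set)
--     for exit_ in exits:
--         from_area = room_index.get(exit_.get("fromuid"))
--         to_area = room_index.get(exit_.get("touid"))
--         if (
--             not from_area
--             or not to_area
--             or from_area == to_area
--             or from_area not in allowed_areas
--             or to_area not in allowed_areas
--         ):
--             continue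
--         connections[from_area].add(to_area)
--         adjacency[from_area].add(to_area)
--         adjacency[to_area].add(from_area)
--     return connections, adjacency
-- ===== SOURCE B (Python) =====
-- from collections import defaultdict
--
--
-- def collect_area_connections(exits, room_index, allowed_areas: set[str]):
--     # Staged group-by: resolve+filter into directed pairs, double them for the
--     # undirected view, then build each map by scanning once per distinct key.
--     directed = []
--     for e in exits:
--         f = room_index.get(e.get("fromuid"))
--         t = room_index.get(e.get("touid"))
--         if f and t and f != t and f in allowed_areas and t in allowed_areas:
--             directed.append((f, t))
--     undirected = [q for p in directed for q in (p, (p[1], p[0]))]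
--
--     def group(pairs):
--         d = defaultdict(set)
--         for key in dict.fromkeys(f for f, _ in pairs):
--             d[key] = {t for f, t in pairs if f == key}
--         return d
--
--     return group(directed), group(undirected)
-- ===== Notes on version B (the rewrite author's own statement) =====
-- stated objective: alternative
-- what changed: A's single pass with incremental set.add updates into two dicts becomes a staged group-by: filter exits into directed pairs, double them in place for the undirected view, then build each map by listing distinct keys (dict.fromkeys) and doing one full scan per key collecting its target set.
import Mathlib
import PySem

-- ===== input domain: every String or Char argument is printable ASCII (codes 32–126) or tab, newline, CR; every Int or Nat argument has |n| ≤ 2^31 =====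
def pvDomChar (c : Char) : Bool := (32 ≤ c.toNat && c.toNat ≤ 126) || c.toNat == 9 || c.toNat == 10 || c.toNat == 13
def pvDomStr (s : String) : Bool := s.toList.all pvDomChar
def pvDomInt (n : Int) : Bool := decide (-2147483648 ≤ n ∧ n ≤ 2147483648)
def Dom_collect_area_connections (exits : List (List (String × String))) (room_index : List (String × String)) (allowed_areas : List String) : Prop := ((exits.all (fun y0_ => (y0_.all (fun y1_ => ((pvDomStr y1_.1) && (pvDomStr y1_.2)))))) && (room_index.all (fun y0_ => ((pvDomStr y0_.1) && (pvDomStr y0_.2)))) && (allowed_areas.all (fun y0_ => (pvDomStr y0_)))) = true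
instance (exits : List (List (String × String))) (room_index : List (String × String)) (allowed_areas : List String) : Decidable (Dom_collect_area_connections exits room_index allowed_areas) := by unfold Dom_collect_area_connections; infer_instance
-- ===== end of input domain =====

-- B replaces A's single pass of incremental set.add dict updates by a staged group-by
-- (filter into directed pairs, double them for the undirected view, one scan per
-- distinct key); same observable result, different construction.

-- ===== PORT A =====
-- the body of A's for-loop: resolve both areas, skip on the guard, else update both maps
def pvStepA (room_index : List (String × String)) (allowed_areas : List String)
    (st : PySem.Dict String (List String) × PySem.Dict String (List String))
    (exit_ : List (String × String)) :
    PySem.Dict String (List String) × PySem.Dict String (List String) :=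
  let from_area := ((PySem.Dict.mk exit_).get? "fromuid").bind
    (fun u => (PySem.Dict.mk room_index).get? u)
  let to_area := ((PySem.Dict.mk exit_).get? "touid").bind
    (fun u => (PySem.Dict.mk room_index).get? u)
  match from_area, to_area with
  | some f, some t =>
      if f = "" ∨ t = "" ∨ f = t ∨ f ∉ allowed_areas ∨ t ∉ allowed_areas then st
      else (st.1.modify f [] (fun s => PySem.Set.add s t),
            (st.2.modify f [] (fun s => PySem.Set.add s t)).modify t [] (fun s => PySem.Set.add s f))
  | _, _ => st

def collect_area_connections (exits : List (List (String × String))) (room_index : List (String × String)) (allowed_areas : List String) : (List (String × List String)) × (List (String × List String)) :=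
  let st := exits.foldl (pvStepA room_index allowed_areas) (PySem.Dict.empty, PySem.Dict.empty)
  (st.1.items, st.2.items)

-- ===== PORT B =====
-- B's filter loop body: the valid (from_area, to_area) pair of one exit, or none
def pvPairOf (room_index : List (String × String)) (allowed_areas : List String)
    (e : List (String × String)) : Option (String × String) :=
  let f? := ((PySem.Dict.mk e).get? "fromuid").bind (fun u => (PySem.Dict.mk room_index).get? u)
  let t? := ((PySem.Dict.mk e).get? "touid").bind (fun u => (PySem.Dict.mk room_index).get? u)
  match f?, t? with
  | some f, some t =>
      if f ≠ "" ∧ t ≠ "" ∧ f ≠ t ∧ f ∈ allowed_areas ∧ t ∈ allowed_areas then some (f, t)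
      else none
  | _, _ => none

-- B's group(pairs): distinct keys via dict.fromkeys (= PySem.List.dedup), then one
-- assignment per key whose value is the set comprehension over a full scan of pairs
def pvGroup (pairs : List (String × String)) : PySem.Dict String (List String) :=
  (PySem.List.dedup (pairs.map Prod.fst)).foldl
    (fun d k => d.insert k (PySem.Set.ofList ((pairs.filter (fun p => p.1 == k)).map Prod.snd)))
    PySem.Dict.empty

def collect_area_connections_alt (exits : List (List (String × String))) (room_index : List (String × String)) (allowed_areas : List String) : (List (String × List String)) × (List (String × List String)) :=
  let directed := exits.filterMap (pvPairOf room_index allowed_areas)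
  let undirected := directed.flatMap (fun p => [p, (p.2, p.1)])
  ((pvGroup directed).items, (pvGroup undirected).items)

-- ===== PRECONDITION & SPEC =====
def Spec_collect_area_connections (exits : List (List (String × String))) (room_index : List (String × String)) (allowed_areas : List String) (out : (List (String × List String)) × (List (String × List String))) : Prop := out = collect_area_connections_alt exits room_index allowed_areas
instance (exits : List (List (String × String))) (room_index : List (String × String)) (allowed_areas : List String) (out : (List (String × List String)) × (List (String × List String))) : Decidable (Spec_collect_area_connections exits room_index allowed_areas out) := by unfold Spec_collect_area_connections; infer_instance

-- ===== CLAIM (what is proved, stated in full; the proofs are below) =====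
def Claim_equal_collect_area_connections : Prop := ∀ (exits : List (List (String × String))) (room_index : List (String × String)) (allowed_areas : List String), Dom_collect_area_connections exits room_index allowed_areas → Spec_collect_area_connections exits room_index allowed_areas (collect_area_connections exits room_index allowed_areas)

-- ===== LEMMAS AND PROOFS =====

-- proof-only abbreviations for the two elementary dict updates A performs
def pvConnStep (d : PySem.Dict String (List String)) (p : String × String) :
    PySem.Dict String (List String) :=
  d.modify p.1 [] (fun s => PySem.Set.add s p.2)

def pvAdjStep (d : PySem.Dict String (List String)) (p : String × String) :
    PySem.Dict String (List String) :=
  (d.modify p.1 [] (fun s => PySem.Set.add s p.2)).modify p.2 [] (fun s => PySem.Set.add s p.1)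

-- A's loop body is B's pair extraction followed by the two elementary updates
theorem stepA_eq_pairOf (room_index : List (String × String)) (allowed_areas : List String)
    (st : PySem.Dict String (List String) × PySem.Dict String (List String))
    (e : List (String × String)) :
    pvStepA room_index allowed_areas st e =
      match pvPairOf room_index allowed_areas e with
      | none => st
      | some p => (pvConnStep st.1 p, pvAdjStep st.2 p) := by
  unfold pvStepA pvPairOf pvConnStep pvAdjStep
  rcases h1 : ((PySem.Dict.mk e).get? "fromuid").bind
      (fun u => (PySem.Dict.mk room_index).get? u) with _ | f <;>
    rcases h2 : ((PySem.Dict.mk e).get? "touid").bind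
      (fun u => (PySem.Dict.mk room_index).get? u) with _ | t <;>
    simp only []
  split_ifs with hA hB hB <;> first | rfl | tauto

-- A's whole fold decomposes componentwise over the filtered pair list
theorem foldA_eq (room_index : List (String × String)) (allowed_areas : List String)
    (exits : List (List (String × String)))
    (c a : PySem.Dict String (List String)) :
    exits.foldl (pvStepA room_index allowed_areas) (c, a) =
      ((exits.filterMap (pvPairOf room_index allowed_areas)).foldl pvConnStep c,
       (exits.filterMap (pvPairOf room_index allowed_areas)).foldl pvAdjStep a) := by
  induction exits generalizing c a with
  | nil => rfl
  | cons e rest ih =>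
      simp only [List.foldl_cons, List.filterMap_cons]
      rw [stepA_eq_pairOf]
      cases h : pvPairOf room_index allowed_areas e with
      | none => simpa using ih c a
      | some p => simpa using ih (pvConnStep c p) (pvAdjStep a p)

-- the adjacency fold over pairs is the connections-style fold over the doubled list
theorem foldAdj_eq_foldConn (l : List (String × String)) (d : PySem.Dict String (List String)) :
    l.foldl pvAdjStep d = (l.flatMap (fun p => [p, (p.2, p.1)])).foldl pvConnStep d := by
  induction l generalizing d with
  | nil => rfl
  | cons p rest ih => simp [List.foldl_cons, ih, pvAdjStep, pvConnStep]

-- the value at key c after the connections-style fold: the deduped targets of c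
theorem getD_foldConn (l : List (String × String)) (d : PySem.Dict String (List String))
    (c : String) :
    (l.foldl pvConnStep d).getD c [] =
      PySem.Set.update (d.getD c []) ((l.filter (fun p => p.1 == c)).map Prod.snd) := by
  induction l generalizing d with
  | nil => simp [PySem.Set.update]
  | cons p rest ih =>
      simp only [List.foldl_cons, List.filter_cons]
      by_cases h : p.1 = c
      · simp [h, ih, pvConnStep, PySem.Dict.getD_modify_self, PySem.Set.update_cons]
      · have : (p.1 == c) = false := by simp [h]
        simp [this, ih, pvConnStep, PySem.Dict.getD_modify, Ne.symm h]

-- A's connections-style fold from empty IS B's group-by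
theorem foldConn_eq_group (l : List (String × String)) :
    (l.foldl pvConnStep PySem.Dict.empty).items = (pvGroup l).items := by
  have hkeys : (l.foldl pvConnStep PySem.Dict.empty).keys = PySem.Set.ofList (l.map Prod.fst) := by
    have := PySem.Dict.keys_foldl_modify_key l Prod.fst []
      (fun d (p : String × String) (s : List String) => PySem.Set.add s p.2)
      (PySem.Dict.empty (κ := String) (ν := List String))
    simpa [pvConnStep, PySem.Dict.keys_empty, PySem.Set.update_nil_left] using this
  have hnd : (l.foldl pvConnStep PySem.Dict.empty).keys.Nodup := by
    rw [hkeys]; exact PySem.Set.nodup_ofList _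
  rw [PySem.Dict.items_eq_map_keys _ hnd []]
  have hB : (pvGroup l).items =
      (PySem.List.dedup (l.map Prod.fst)).map
        (fun k => (k, PySem.Set.ofList ((l.filter (fun p => p.1 == k)).map Prod.snd))) := by
    unfold pvGroup
    have := PySem.Dict.items_foldl_insert_fresh (l := PySem.List.dedup (l.map Prod.fst))
      (d := PySem.Dict.empty (κ := String) (ν := List String))
      (k := fun x => x)
      (v := fun k => PySem.Set.ofList ((l.filter (fun p => p.1 == k)).map Prod.snd))
      (by intro a _; simp [PySem.Dict.contains_empty])
      (by simp)
    simpa using this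
  rw [hB, hkeys]
  simp only [PySem.List.dedup_eq_ofList]
  apply List.map_congr_left
  intro k _
  rw [getD_foldConn]
  simp [PySem.Dict.getD_empty, PySem.Set.update_nil_left]

-- ===== VERDICT (by name: the statement is the Claim_ definition above) =====
theorem collect_area_connections_spec : Claim_equal_collect_area_connections := by
  intro exits room_index allowed_areas _
  unfold Spec_collect_area_connections collect_area_connections collect_area_connections_alt
  rw [foldA_eq, foldAdj_eq_foldConn]
  simp only [foldConn_eq_group]
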